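-- pv_equiv track=rewrite | github.com/amarh/openPLM | trunk/openPLM/apps/badges/meta_badges.py | has_all_pony
-- ===== SOURCE A (Python) =====
-- def string_in(src, str_list):
--     """
--     check if all string in str_list are in src
--     """
--     ret = True
--     if isinstance(str_list, str):
--         str_list=str_list.split(" ")
--
--     for s in str_list:
--         if src.find(s)==-1 :
--             ret = False
--             break
--     return ret
--
-- def is_pony(src, file_names=None, found_name=False):
--     """
--     Test if src contains at least one file name from file_names list
--
--     :param src: file name to test
--     :param file_names: list of suggested files name (pony names)
--     :param found_name: if True return the file name which was founded
--
--     :return: True if src contains a file name from file_names and a string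
--     """
--     if not file_names:
--         file_names=["pinkie pie", "applejack", "twilight sparkle", "rarity", "rainbow dash", "fluttershy"]
--     ret = False
--     founded = ""
--     for pony in file_names:
--         ret = string_in(src,pony)
--         if ret :
--             if found_name:
--                 founded=pony
--             break
--     return ret,founded
--
-- def remove_pony(pony,pony_names):
--     new_ponies=[]
--     for p in pony_names:
--         if p!=pony:
--             new_ponies.append(p)
--     return new_ponies
--
-- def has_all_pony(f_names, pony_names):
--     """
--     Test if a list of file names contains files named by all pony
--
--     :param f_names: list of file names to test
--     :param pony_names: list of pony names
--
--     """
--     if not pony_names: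
--         return True
--
--     if not f_names or len(f_names)<len(pony_names):
--         return False
--
--     f_n = f_names.pop(0)
--     pony, founded = is_pony(f_n, file_names=pony_names, found_name=True)
--     if pony and len(pony_names)==1:
--         return True
--     elif pony:
--         new_ponies = remove_pony(founded,pony_names)
--         return has_all_pony(f_names, new_ponies)
--     else:
--         return has_all_pony(f_names, pony_names)
-- ===== SOURCE B (Python) =====
-- def has_all_pony(f_names, pony_names):
--     # split each pony name into its words once, up front (A re-splits on every file)
--     remaining = [(p, p.split(" ")) for p in pony_names]
--     while True:
--         if not remaining:
--             return True
--         if not f_names or len(f_names) < len(remaining):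
--             return False
--         f_n = f_names.pop(0)
--         match = None
--         for p, ws in remaining:
--             ok = True
--             for w in ws:
--                 if w not in f_n:
--                     ok = False
--                     break
--             if ok:
--                 match = p
--                 break
--         if match is not None:
--             if len(remaining) == 1:
--                 return True
--             remaining = [pw for pw in remaining if pw[0] != match]
-- ===== Notes on version B (the rewrite author's own statement) =====
-- stated objective: faster
-- what changed: Replaces the mutual tail recursion through three helpers (string_in's break loop, is_pony's flag/founded loop, remove_pony's append loop) by a single while-loop over a list of (pony, words) pairs whose word lists are split once up front, using the 'in' operator and plain break loops instead of per-pony helper calls.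
import Mathlib
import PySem

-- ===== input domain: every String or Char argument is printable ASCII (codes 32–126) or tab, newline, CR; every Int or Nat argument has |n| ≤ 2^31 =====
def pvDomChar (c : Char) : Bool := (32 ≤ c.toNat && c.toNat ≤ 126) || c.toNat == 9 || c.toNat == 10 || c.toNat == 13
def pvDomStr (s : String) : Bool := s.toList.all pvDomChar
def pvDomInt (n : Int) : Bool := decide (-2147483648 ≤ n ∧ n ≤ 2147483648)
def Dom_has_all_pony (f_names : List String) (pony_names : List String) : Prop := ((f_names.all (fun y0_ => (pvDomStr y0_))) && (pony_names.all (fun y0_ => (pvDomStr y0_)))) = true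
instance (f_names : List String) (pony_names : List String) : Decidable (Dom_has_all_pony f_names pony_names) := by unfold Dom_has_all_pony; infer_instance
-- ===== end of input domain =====

-- B replaces A's mutual recursion through three helpers by one while-loop over (pony, words)
-- pairs split once up front (measurably faster; A re-splits every pony name on every file);
-- A pops f_names[0] in place (B mutates it identically); the theorem is about the return value.

-- ===== PORT A =====
-- string_in's loop: ret starts true, set to false and break on the first word not found
def stringInLoop (src : String) (ret : Bool) : List String → Bool
  | [] => ret
  | s :: rest => if PySem.Str.find src s == -1 then false else stringInLoop src ret rest

def string_in (src : String) (pony : String) : Bool :=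
  stringInLoop src true ((PySem.Str.split? pony " ").getD [])

-- is_pony's loop: ret = string_in each step, founded set and break on success (found_name=True)
def isPonyLoop (src : String) (ret : Bool) (founded : String) : List String → Bool × String
  | [] => (ret, founded)
  | p :: rest =>
    let r := string_in src p
    if r then (r, p) else isPonyLoop src r founded rest

def is_pony (src : String) (file_names : List String) : Bool × String :=
  let fns := if file_names.isEmpty then
      ["pinkie pie", "applejack", "twilight sparkle", "rarity", "rainbow dash", "fluttershy"]
    else file_names
  isPonyLoop src false "" fns

def remove_pony (pony : String) (pony_names : List String) : List String :=
  pony_names.foldl (fun acc p => if p != pony then acc ++ [p] else acc) []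

def has_all_pony (f_names : List String) (pony_names : List String) : Bool :=
  if pony_names.isEmpty then true
  else match f_names with
    | [] => false
    | f_n :: rest =>
      if (f_n :: rest).length < pony_names.length then false
      else
        let pf := is_pony f_n pony_names
        if pf.1 && pony_names.length == 1 then true
        else if pf.1 then has_all_pony rest (remove_pony pf.2 pony_names)
        else has_all_pony rest pony_names

-- ===== PORT B =====
-- inner loop: ok starts True, set False and break on the first word not in f_n
def altOkLoop (f_n : String) : List String → Bool
  | [] => true
  | w :: rest => if !(PySem.Str.isIn w f_n) then false else altOkLoop f_n rest

-- "for p, ws in remaining: … break": first pony whose words are all in f_n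
def altFindLoop (f_n : String) : List (String × List String) → Option String
  | [] => none
  | (p, ws) :: rest => if altOkLoop f_n ws then some p else altFindLoop f_n rest

-- the while loop: state = (f_names, remaining)
def altLoop (f_names : List String) (remaining : List (String × List String)) : Bool :=
  if remaining.isEmpty then true
  else match f_names with
    | [] => false
    | f_n :: rest =>
      if (f_n :: rest).length < remaining.length then false
      else match altFindLoop f_n remaining with
        | some m =>
          if remaining.length == 1 then true
          else altLoop rest (remaining.filter (fun pw => pw.1 != m))
        | none => altLoop rest remaining

def has_all_pony_alt (f_names : List String) (pony_names : List String) : Bool :=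
  altLoop f_names (pony_names.map (fun p => (p, (PySem.Str.split? p " ").getD [])))

-- ===== PRECONDITION & SPEC =====
def Spec_has_all_pony (f_names : List String) (pony_names : List String) (out : Bool) : Prop := out = has_all_pony_alt f_names pony_names
instance (f_names : List String) (pony_names : List String) (out : Bool) : Decidable (Spec_has_all_pony f_names pony_names out) := by unfold Spec_has_all_pony; infer_instance

-- ===== CLAIM (what is proved, stated in full; the proofs are below) =====
def Claim_equal_has_all_pony : Prop := ∀ (f_names : List String) (pony_names : List String), Dom_has_all_pony f_names pony_names → Spec_has_all_pony f_names pony_names (has_all_pony f_names pony_names)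

-- ===== LEMMAS AND PROOFS =====

def ponyPair (p : String) : String × List String := (p, (PySem.Str.split? p " ").getD [])

theorem findBeq_eq (src w : String) :
    (PySem.Str.find src w == -1) = !(PySem.Str.isIn w src) := by
  by_cases hin : w.toList <:+: src.toList
  · have h1 : PySem.Chars.find src.toList w.toList ≠ -1 :=
      (PySem.Chars.find_ne_neg_one_iff src.toList w.toList).mpr hin
    have h2 : PySem.Chars.isIn w.toList src.toList = true :=
      (PySem.Chars.isIn_iff_infix w.toList src.toList).mpr hin
    simp [h1, h2]
  · have h1 : PySem.Chars.find src.toList w.toList = -1 :=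
      (PySem.Chars.find_eq_neg_one_iff src.toList w.toList).mpr hin
    have h2 : PySem.Chars.isIn w.toList src.toList = false :=
      (PySem.Chars.isIn_eq_false_iff w.toList src.toList).mpr hin
    simp [h1, h2]

theorem altOkLoop_eq (src : String) (ws : List String) :
    altOkLoop src ws = stringInLoop src true ws := by
  induction ws with
  | nil => rfl
  | cons w rest ih =>
    simp only [altOkLoop, stringInLoop, findBeq_eq, ih]

theorem altOkLoop_string_in (src p : String) :
    altOkLoop src ((PySem.Str.split? p " ").getD []) = string_in src p := by
  rw [altOkLoop_eq]; rfl

theorem altFindLoop_find? (src : String) (ps : List String) :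
    altFindLoop src (ps.map ponyPair) = ps.find? (fun p => string_in src p) := by
  induction ps with
  | nil => rfl
  | cons p rest ih =>
    simp only [List.map_cons, altFindLoop, ponyPair, altOkLoop_string_in, List.find?]
    by_cases h : string_in src p
    · simp [h]
    · simp [h, ih]

theorem isPonyLoop_find? (src : String) (ps : List String) :
    isPonyLoop src false "" ps =
      match ps.find? (fun p => string_in src p) with
      | some m => (true, m)
      | none => (false, "") := by
  induction ps with
  | nil => rfl
  | cons p rest ih =>
    simp only [isPonyLoop, List.find?]
    by_cases h : string_in src p
    · simp [h]
    · simp [h, ih]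

theorem remove_pony_filter (pony : String) (ps : List String) :
    remove_pony pony ps = ps.filter (fun p => p != pony) := by
  suffices h : ∀ acc : List String,
      ps.foldl (fun acc p => if p != pony then acc ++ [p] else acc) acc
        = acc ++ ps.filter (fun p => p != pony) by
    simpa [remove_pony] using h []
  induction ps with
  | nil => intro acc; simp
  | cons p rest ih =>
    intro acc
    rw [List.foldl_cons, List.filter_cons]
    by_cases h : p = pony
    · rw [if_neg (by simp [h]), if_neg (by simp [h]), ih]
    · rw [if_pos (by simp [h]), if_pos (by simp [h]), ih]
      simp

theorem filter_map_ponyPair (m : String) (ps : List String) :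
    (ps.map ponyPair).filter (fun pw => pw.1 != m)
      = (ps.filter (fun p => p != m)).map ponyPair := by
  induction ps with
  | nil => rfl
  | cons p rest ih =>
    simp only [List.map_cons, List.filter_cons, ponyPair]
    by_cases h : p = m
    · rw [if_neg (by simp [h]), if_neg (by simp [h]), ih]
    · rw [if_pos (by simp [h]), if_pos (by simp [h]), ih]
      rfl

theorem has_all_pony_eq (f_names pony_names : List String) :
    has_all_pony f_names pony_names = altLoop f_names (pony_names.map ponyPair) := by
  induction f_names generalizing pony_names with
  | nil =>
    rw [has_all_pony.eq_def, altLoop.eq_def]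
    cases pony_names <;> rfl
  | cons f_n rest ih =>
    rw [has_all_pony.eq_def, altLoop.eq_def]
    cases pony_names with
    | nil => rfl
    | cons q qs =>
      simp only [List.map_cons, List.isEmpty_cons, Bool.false_eq_true, if_false]
      have hfd : altFindLoop f_n (ponyPair q :: qs.map ponyPair)
          = (q :: qs).find? (fun p => string_in f_n p) := by
        simpa using altFindLoop_find? f_n (q :: qs)
      have hlen2 : (f_n :: rest).length < (ponyPair q :: List.map ponyPair qs).length
          ↔ (f_n :: rest).length < (q :: qs).length := by
        simp
      by_cases hlen : (f_n :: rest).length < (q :: qs).length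
      · rw [if_pos hlen, if_pos (hlen2.mpr hlen)]
      · rw [if_neg hlen, if_neg (fun h => hlen (hlen2.mp h))]
        cases hm : (q :: qs).find? (fun p => string_in f_n p) with
        | some m =>
          have hip2 : is_pony f_n (q :: qs) = (true, m) := by
            rw [is_pony]
            simp only [List.isEmpty_cons, Bool.false_eq_true, if_false]
            rw [isPonyLoop_find?, hm]
          rw [hfd, hm]
          cases qs with
          | nil => simp [hip2]
          | cons q2 qs2 =>
            have hflt : (ponyPair q :: (q2 :: qs2).map ponyPair).filter (fun pw => pw.1 != m)
                = ((q :: q2 :: qs2).filter (fun p => p != m)).map ponyPair := by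
              simpa using filter_map_ponyPair m (q :: q2 :: qs2)
            have c1 : ((q :: q2 :: qs2).length == 1) = false := by simp
            have c2 : ((ponyPair q :: ponyPair q2 :: List.map ponyPair qs2).length == 1) = false := by
              simp
            simp only [List.map_cons] at hflt ⊢
            rw [hflt] at *
            simp only [hip2, c1, c2, Bool.and_false, Bool.false_eq_true, if_false, if_true]
            rw [remove_pony_filter, ih]
        | none =>
          have hip2 : is_pony f_n (q :: qs) = (false, "") := by
            rw [is_pony]
            simp only [List.isEmpty_cons, Bool.false_eq_true, if_false]
            rw [isPonyLoop_find?, hm]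
          rw [hfd, hm]
          simp only [hip2, Bool.false_and, Bool.false_eq_true, if_false]
          simpa using ih (q :: qs)

theorem has_all_pony_eq_alt (f_names pony_names : List String) :
    has_all_pony f_names pony_names = has_all_pony_alt f_names pony_names :=
  has_all_pony_eq f_names pony_names

-- ===== VERDICT (by name: the statement is the Claim_ definition above) =====
theorem has_all_pony_spec : Claim_equal_has_all_pony := by
  intro f p _
  unfold Spec_has_all_pony
  exact has_all_pony_eq_alt f p
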